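-- pv_equiv track=rewrite | github.com/tandeitnik/Evolving_Quantum_Circuits | utility_functions.py | list_of_errors
-- ===== SOURCE A (Python) =====
-- import itertools
--
-- def list_of_errors(N,t):
--
--     errors_literal = []
--     affected_qubits = []
--
--     for i in range(1,t+1):
--
--         combinations = list(itertools.combinations(range(N),i))
--
--         e_list = []
--
--         for j in range(len(combinations)*3**i):
--             e_list.append(['I']*N)
--
--         for j in range(len(combinations)):
--
--             for k in range(3**i):
--                 affected_qubits.append(combinations[j])
--
--             for k in range(i):
--
--                 for l in range(3**i):
--
--                     if (l // 3**k) % 3 == 0: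
--
--                         e_list[j*3**i+l][combinations[j][k]] = 'X'
--
--                     if (l // 3**k) % 3 == 1:
--
--                         e_list[j*3**i + l][combinations[j][k]] = 'Y'
--
--                     if (l // 3**k) % 3 == 2:
--
--                         e_list[j*3**i + l][combinations[j][k]] = 'Z'
--
--
--
--         for k in range(len(e_list)):
--             errors_literal.append(e_list[k])
--
--     return errors_literal, affected_qubits
-- ===== SOURCE B (Python) =====
-- import itertools
--
-- def list_of_errors(N, t):
--     errors_literal = []
--     affected_qubits = []
--     for i in range(1, t + 1):
--         for c in itertools.combinations(range(N), i):
--             for p in itertools.product('XYZ', repeat=i):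
--                 row = ['I'] * N
--                 for q, a in zip(c, reversed(p)):
--                     row[q] = a
--                 errors_literal.append(row)
--                 affected_qubits.append(c)
--     return errors_literal, affected_qubits
-- ===== Notes on version B (the rewrite author's own statement) =====
-- stated objective: simpler
-- what changed: B drops A's preallocated row table filled column-by-column with (l // 3**k) % 3 digit arithmetic and index offsets, and instead builds each error row directly per (combination, itertools.product('XYZ') tuple), appending row by row.
import Mathlib
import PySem

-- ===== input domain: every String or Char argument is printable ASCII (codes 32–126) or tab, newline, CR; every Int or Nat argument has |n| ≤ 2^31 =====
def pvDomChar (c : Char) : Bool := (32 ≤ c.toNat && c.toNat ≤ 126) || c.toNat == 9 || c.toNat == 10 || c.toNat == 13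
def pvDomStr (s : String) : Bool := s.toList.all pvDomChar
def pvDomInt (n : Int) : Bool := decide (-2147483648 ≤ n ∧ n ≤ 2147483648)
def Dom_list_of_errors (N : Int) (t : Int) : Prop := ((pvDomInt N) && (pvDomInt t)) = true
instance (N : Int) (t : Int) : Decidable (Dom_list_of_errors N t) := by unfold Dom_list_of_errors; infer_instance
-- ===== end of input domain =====

-- B replaces A's preallocated table filled column-by-column with base-3 digit arithmetic by
-- building each error row directly per (combination, Pauli tuple); objective: simpler.

-- ===== PORT A =====
-- e_list[idx][pos] = v  (idx, pos always in range and nonnegative in A, so set/getD is exact)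
def pvSetCell (e : List (List String)) (idx : Nat) (pos : Int) (v : String) : List (List String) :=
  e.set idx ((e.getD idx []).set pos.toNat v)

-- all loop bounds in A are nonnegative Python ints, so List.range over Nat is exact;
-- l // 3**k on nonnegative ints is Nat division
def list_of_errors (N : Int) (t : Int) : List (List String) × List (List Int) :=
  (PySem.List.pyRange 1 (t + 1)).foldl
    (fun (acc : List (List String) × List (List Int)) i =>
      let combs := PySem.List.combinations (PySem.List.pyRange 0 N) i.toNat
      let e0 : List (List String) :=
        (List.range (combs.length * 3 ^ i.toNat)).foldl
          (fun e _ => e ++ [List.replicate N.toNat "I"]) []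
      let st :=
        (List.range combs.length).foldl
          (fun (st : List (List Int) × List (List String)) j =>
            ((List.range (3 ^ i.toNat)).foldl (fun a _ => a ++ [combs.getD j []]) st.1,
             (List.range i.toNat).foldl
               (fun e k =>
                 (List.range (3 ^ i.toNat)).foldl
                   (fun e l =>
                     let d := l / 3 ^ k % 3
                     let pos := (combs.getD j []).getD k 0
                     let e := if d = 0 then pvSetCell e (j * 3 ^ i.toNat + l) pos "X" else e
                     let e := if d = 1 then pvSetCell e (j * 3 ^ i.toNat + l) pos "Y" else e
                     if d = 2 then pvSetCell e (j * 3 ^ i.toNat + l) pos "Z" else e)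
                   e)
               st.2))
          (acc.2, e0)
      ((List.range st.2.length).foldl (fun el k => el ++ [st.2.getD k []]) acc.1, st.1))
    ([], [])

-- ===== PORT B =====
-- itertools.product('XYZ', repeat=n), in Python's order (last coordinate fastest)
def pvProdXYZ : Nat → List (List String)
  | 0 => [[]]
  | n + 1 => ["X", "Y", "Z"].flatMap (fun x => (pvProdXYZ n).map (x :: ·))

def list_of_errors_alt (N : Int) (t : Int) : List (List String) × List (List Int) :=
  (PySem.List.pyRange 1 (t + 1)).foldl
    (fun (acc : List (List String) × List (List Int)) i =>
      (PySem.List.combinations (PySem.List.pyRange 0 N) i.toNat).foldl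
        (fun acc c =>
          (pvProdXYZ i.toNat).foldl
            (fun acc p =>
              let row := (c.zip p.reverse).foldl
                (fun r (qa : Int × String) => r.set qa.1.toNat qa.2)
                (List.replicate N.toNat "I")
              (acc.1 ++ [row], acc.2 ++ [c]))
            acc)
        acc)
    ([], [])

-- ===== PRECONDITION & SPEC =====
def Spec_list_of_errors (N : Int) (t : Int) (out : List (List String) × List (List Int)) : Prop := out = list_of_errors_alt N t
instance (N : Int) (t : Int) (out : List (List String) × List (List Int)) : Decidable (Spec_list_of_errors N t out) := by unfold Spec_list_of_errors; infer_instance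

-- ===== CLAIM (what is proved, stated in full; the proofs are below) =====
def Claim_equal_list_of_errors : Prop := ∀ (N : Int) (t : Int), Dom_list_of_errors N t → Spec_list_of_errors N t (list_of_errors N t)

-- ===== LEMMAS AND PROOFS =====

-- the Pauli letter A writes for a base-3 digit
def pvLetter (d : Nat) : String := if d = 0 then "X" else if d = 1 then "Y" else "Z"

-- base-3 digits of l, least significant first, as letters (n of them)
def pvRevTup : Nat → Nat → List String
  | 0, _ => []
  | n + 1, l => pvLetter (l % 3) :: pvRevTup n (l / 3)

-- the row both programs produce for combination c and error index l
def pvRowA : List Int → Nat → List String → List String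
  | [], _, r => r
  | q :: c, l, r => pvRowA c (l / 3) (r.set q.toNat (pvLetter (l % 3)))

def pvRows (c : List Int) (i : Nat) (base : List String) : List (List String) :=
  (List.range (3 ^ i)).map (fun l => pvRowA c l base)

theorem pvRevTup_high (n : Nat) : ∀ l, pvRevTup (n + 1) l = pvRevTup n l ++ [pvLetter (l / 3 ^ n % 3)] := by
  induction n with
  | zero => intro l; simp [pvRevTup]
  | succ n ih =>
      intro l
      rw [pvRevTup, ih (l / 3), pvRevTup]
      have : l / 3 / 3 ^ n = l / 3 ^ (n + 1) := by
        rw [Nat.div_div_eq_div_mul, pow_succ']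
      simp [this]

theorem pvRevTup_low (n : Nat) : ∀ d l, pvRevTup n (d * 3 ^ n + l) = pvRevTup n l := by
  induction n with
  | zero => intro d l; simp [pvRevTup]
  | succ n ih =>
      intro d l
      have h3 : d * 3 ^ (n + 1) + l = 3 * (d * 3 ^ n) + l := by ring
      have hmod : (d * 3 ^ (n + 1) + l) % 3 = l % 3 := by
        rw [h3]; omega
      have hdiv : (d * 3 ^ (n + 1) + l) / 3 = d * 3 ^ n + l / 3 := by
        rw [h3]; omega
      rw [pvRevTup, pvRevTup, hmod, hdiv, ih]

theorem pvProd_eq : ∀ (n : Nat), pvProdXYZ n = (List.range (3 ^ n)).map (fun l => (pvRevTup n l).reverse) := by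
  intro n
  induction n with
  | zero => simp [pvProdXYZ, pvRevTup]
  | succ n ih =>
      have h0 : 0 < (3 : Nat) ^ n := pow_pos (by norm_num) n
      have key : ∀ d, d < 3 → ∀ l, l < 3 ^ n →
          (pvRevTup (n + 1) (d * 3 ^ n + l)).reverse = pvLetter d :: (pvRevTup n l).reverse := by
        intro d hd l hl
        rw [pvRevTup_high, pvRevTup_low]
        have h1 : (d * 3 ^ n + l) / 3 ^ n = d := by
          rw [Nat.add_comm, Nat.add_mul_div_right _ _ h0, Nat.div_eq_of_lt hl, Nat.zero_add]
        rw [h1, Nat.mod_eq_of_lt hd]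
        simp
      have hsplit : (3 : Nat) ^ (n + 1) = 3 ^ n + (3 ^ n + 3 ^ n) := by
        have := pow_succ' (3 : Nat) n; omega
      rw [hsplit, List.range_add, List.range_add]
      simp only [List.map_append, List.map_map]
      show pvProdXYZ (n + 1) = _
      simp only [pvProdXYZ, List.flatMap_cons, List.flatMap_nil, List.append_nil, ih, List.map_map]
      congr 1
      · apply List.map_congr_left
        intro l hl
        rw [List.mem_range] at hl
        have := key 0 (by norm_num) l hl
        simpa using this.symm
      congr 1
      · apply List.map_congr_left
        intro l hl
        rw [List.mem_range] at hl
        have := key 1 (by norm_num) l hl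
        simpa [Nat.one_mul] using this.symm
      · apply List.map_congr_left
        intro l hl
        rw [List.mem_range] at hl
        have := key 2 (by norm_num) l hl
        have h2 : 2 * 3 ^ n + l = 3 ^ n + 3 ^ n + l := by ring
        rw [h2] at this
        simpa using this.symm
theorem pvRowA_fold (c : List Int) : ∀ l r,
    (List.range c.length).foldl (fun r k => r.set (c.getD k 0).toNat (pvLetter (l / 3 ^ k % 3))) r
      = pvRowA c l r := by
  induction c with
  | nil => intro l r; simp [pvRowA]
  | cons q c ih =>
      intro l r
      rw [List.length_cons, List.range_succ_eq_map, List.foldl_cons, List.foldl_map]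
      have hb : (fun (r : List String) k =>
          r.set ((q :: c).getD (Nat.succ k) 0).toNat (pvLetter (l / 3 ^ (Nat.succ k) % 3)))
          = (fun (r : List String) k => r.set (c.getD k 0).toNat (pvLetter (l / 3 / 3 ^ k % 3))) := by
        funext r k
        have : l / 3 ^ (k + 1) = l / 3 / 3 ^ k := by
          rw [Nat.div_div_eq_div_mul, ← pow_succ']
        simp [this]
      rw [hb]
      simp only [pvRowA, List.getD_cons_zero, pow_zero, Nat.div_one]
      exact ih (l / 3) _
theorem pvRowB_zip (c : List Int) : ∀ n l r, c.length = n →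
    (c.zip (pvRevTup n l)).foldl (fun r (qa : Int × String) => r.set qa.1.toNat qa.2) r
      = pvRowA c l r := by
  induction c with
  | nil => intro n l r _; simp [pvRowA]
  | cons q c ih =>
      intro n l r h
      cases n with
      | zero => simp at h
      | succ n =>
          rw [pvRevTup]
          simp only [List.zip_cons_cons, List.foldl_cons]
          exact ih n (l / 3) _ (by simpa using h)
theorem pvMapIdx_replicate {α β : Type} (b : α) (f : Nat → α → β) : ∀ (n : Nat),
    (List.replicate n b).mapIdx f = (List.range n).map (fun l => f l b) := by
  intro n
  induction n generalizing f with
  | zero => simp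
  | succ n ih =>
      rw [List.replicate_succ, List.mapIdx_cons, List.range_succ_eq_map, List.map_cons, List.map_map, ih]
      rfl
theorem pvGetD_range_map {α : Type} (xs : List α) (d : α) :
    (List.range xs.length).map (fun j => xs.getD j d) = xs := by
  induction xs with
  | nil => simp
  | cons x xs ih =>
      rw [List.length_cons, List.range_succ_eq_map, List.map_cons, List.map_map]
      simpa using ih
theorem pvPass_eq : ∀ (xs pre post : List (List String))
    (g : Nat → List String → List String),
    (List.range xs.length).foldl
        (fun e l => e.set (pre.length + l) (g l (e.getD (pre.length + l) []))) (pre ++ (xs ++ post))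
      = pre ++ (xs.mapIdx g ++ post) := by
  intro xs
  induction xs with
  | nil => intro pre post g; simp
  | cons x xs ih =>
      intro pre post g
      rw [List.length_cons, List.range_succ_eq_map, List.foldl_cons, List.foldl_map]
      have hget : (pre ++ (x :: xs ++ post)).getD (pre.length + 0) [] = x := by
        rw [Nat.add_zero, List.getD_eq_getElem?_getD, List.getElem?_append_right (le_refl _)]
        simp
      have hset : (pre ++ (x :: xs ++ post)).set (pre.length + 0) (g 0 x)
          = (pre ++ [g 0 x]) ++ (xs ++ post) := by
        rw [Nat.add_zero, List.set_append]
        simp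
      rw [hget, hset]
      have hfun : (fun (e : List (List String)) k =>
            e.set (pre.length + Nat.succ k) (g (Nat.succ k) (e.getD (pre.length + Nat.succ k) [])))
          = (fun (e : List (List String)) l =>
            e.set ((pre ++ [g 0 x]).length + l)
              ((fun l => g (l + 1)) l (e.getD ((pre ++ [g 0 x]).length + l) []))) := by
        funext e k
        have : pre.length + Nat.succ k = (pre ++ [g 0 x]).length + k := by
          simp; omega
        rw [this]
      rw [hfun, ih (pre ++ [g 0 x]) post (fun l => g (l + 1))]
      simp [List.mapIdx_cons]
theorem pvKpass_eq : ∀ (ks : List Nat) (xs pre post : List (List String))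
    (F : Nat → Nat → List String → List String),
    ks.foldl
        (fun e k =>
          (List.range xs.length).foldl
            (fun e l => e.set (pre.length + l) (F k l (e.getD (pre.length + l) []))) e)
        (pre ++ (xs ++ post))
      = pre ++ (xs.mapIdx (fun l r => ks.foldl (fun r k => F k l r) r) ++ post) := by
  intro ks
  induction ks with
  | nil =>
      intro xs pre post F
      induction xs with
      | nil => simp
      | cons x xs ihx => simpa [List.mapIdx_cons] using ihx
  | cons k ks ih =>
      intro xs pre post F
      rw [List.foldl_cons, pvPass_eq xs pre post (F k)]
      have hlen : xs.length = (xs.mapIdx (F k)).length := (List.length_mapIdx).symm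
      rw [hlen, ih (xs.mapIdx (F k)) pre post F, List.mapIdx_mapIdx]
      rfl
theorem pvBody_eq (e : List (List String)) (idx : Nat) (pos : Int) (n : Nat) :
    (let d := n % 3
     let e1 := if d = 0 then pvSetCell e idx pos "X" else e
     let e2 := if d = 1 then pvSetCell e1 idx pos "Y" else e1
     if d = 2 then pvSetCell e2 idx pos "Z" else e2)
      = pvSetCell e idx pos (pvLetter (n % 3)) := by
  have h : n % 3 = 0 ∨ n % 3 = 1 ∨ n % 3 = 2 := by omega
  rcases h with h | h | h <;> simp [h, pvLetter]

theorem pvAppend_getD {α : Type} (xs : List α) (d : α) (acc : List α) :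
    (List.range xs.length).foldl (fun el k => el ++ [xs.getD k d]) acc = acc ++ xs := by
  rw [PySem.List.foldl_append_singleton_eq_map (fun k => xs.getD k d), pvGetD_range_map]

theorem pvFlatMap_getD {α β : Type} (xs : List α) (d : α) (h : α → List β) :
    (List.range xs.length).flatMap (fun j => h (xs.getD j d)) = xs.flatMap h := by
  conv_rhs => rw [← pvGetD_range_map xs d]
  rw [List.flatMap_map]

theorem pvBlock_eq (i M : Nat) (hM : M = 3 ^ i) (base : List String) (combs : List (List Int))
    (hc : ∀ c ∈ combs, c.length = i) :
    ∀ (n j0 : Nat) (pre : List (List String)), j0 + n = combs.length → pre.length = j0 * M →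
    (List.range n).foldl
        (fun e d =>
          (List.range i).foldl
            (fun e k =>
              (List.range M).foldl
                (fun e l =>
                  pvSetCell e ((j0 + d) * M + l) ((combs.getD (j0 + d) []).getD k 0)
                    (pvLetter (l / 3 ^ k % 3)))
                e)
            e)
        (pre ++ List.replicate (n * M) base)
      = pre ++ ((List.range n).map (fun d => pvRows (combs.getD (j0 + d) []) i base)).flatten := by
  intro n
  induction n with
  | zero => intro j0 pre _ _; simp
  | succ n ih =>
      intro j0 pre hj hpre
      have hj0 : j0 < combs.length := by omega
      have hcl : (combs.getD j0 []).length = i := by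
        rw [List.getD_eq_getElem combs [] hj0]
        exact hc _ (List.getElem_mem hj0)
      rw [List.range_succ_eq_map, List.foldl_cons, List.foldl_map]
      have hrepl : List.replicate ((n + 1) * M) base
          = List.replicate M base ++ List.replicate (n * M) base := by
        rw [← List.replicate_add]; congr 1; ring
      rw [hrepl]
      -- first iteration (d = 0) is one k-pass over the first segment
      have hfn : (fun (e : List (List String)) k =>
            (List.range M).foldl
              (fun e l =>
                pvSetCell e ((j0 + 0) * M + l) ((combs.getD (j0 + 0) []).getD k 0)
                  (pvLetter (l / 3 ^ k % 3)))
              e)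
          = (fun (e : List (List String)) k =>
            (List.range (List.replicate M base).length).foldl
              (fun e l => e.set (pre.length + l)
                ((fun k l (r : List String) =>
                    r.set ((combs.getD j0 []).getD k 0).toNat (pvLetter (l / 3 ^ k % 3))) k l
                  (e.getD (pre.length + l) [])))
              e) := by
        funext e k
        rw [List.length_replicate]
        congr 1
        funext e l
        rw [pvSetCell]
        congr 2 <;> simp [hpre]
      rw [hfn]
      have hk := pvKpass_eq (List.range i) (List.replicate M base) pre (List.replicate (n * M) base)
        (fun k l (r : List String) => r.set ((combs.getD j0 []).getD k 0).toNat (pvLetter (l / 3 ^ k % 3)))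
      rw [hk]
      have hseg : (List.replicate M base).mapIdx
            (fun l r => (List.range i).foldl
              (fun (r : List String) k =>
                r.set ((combs.getD j0 []).getD k 0).toNat (pvLetter (l / 3 ^ k % 3))) r)
          = pvRows (combs.getD j0 []) i base := by
        rw [pvMapIdx_replicate, pvRows, hM]
        apply List.map_congr_left
        intro l _
        rw [← hcl, ← pvRowA_fold]
      rw [hseg]
      have hassoc : pre ++ (pvRows (combs.getD j0 []) i base ++ List.replicate (n * M) base)
          = (pre ++ pvRows (combs.getD j0 []) i base) ++ List.replicate (n * M) base := by
        rw [List.append_assoc]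
      rw [hassoc]
      have hpre' : (pre ++ pvRows (combs.getD j0 []) i base).length = (j0 + 1) * M := by
        rw [List.length_append, hpre, pvRows, List.length_map, List.length_range, ← hM]
        ring
      have hfn2 : (fun (e : List (List String)) d =>
            (List.range i).foldl
              (fun e k =>
                (List.range M).foldl
                  (fun e l =>
                    pvSetCell e ((j0 + Nat.succ d) * M + l) ((combs.getD (j0 + Nat.succ d) []).getD k 0)
                      (pvLetter (l / 3 ^ k % 3)))
                  e)
              e)
          = (fun (e : List (List String)) d =>
            (List.range i).foldl
              (fun e k =>
                (List.range M).foldl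
                  (fun e l =>
                    pvSetCell e ((j0 + 1 + d) * M + l) ((combs.getD (j0 + 1 + d) []).getD k 0)
                      (pvLetter (l / 3 ^ k % 3)))
                  e)
              e) := by
        funext e d
        have : j0 + Nat.succ d = j0 + 1 + d := by omega
        rw [this]
      rw [hfn2, ih (j0 + 1) _ (by omega) hpre']
      rw [List.map_cons, List.map_map, List.flatten_cons]
      have : (fun d => pvRows (combs.getD (j0 + d) []) i base) ∘ Nat.succ
          = fun d => pvRows (combs.getD (j0 + 1 + d) []) i base := by
        funext d
        have : j0 + Nat.succ d = j0 + 1 + d := by omega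
        simp [Function.comp, this]
      rw [this]
      simp

theorem pvProd_length (n : Nat) : (pvProdXYZ n).length = 3 ^ n := by
  rw [pvProd_eq, List.length_map, List.length_range]

theorem pvRowsB (c : List Int) (n : Nat) (base : List String) (h : c.length = n) :
    (pvProdXYZ n).map
        (fun p => (c.zip p.reverse).foldl (fun r (qa : Int × String) => r.set qa.1.toNat qa.2) base)
      = pvRows c n base := by
  rw [pvProd_eq, List.map_map, pvRows]
  apply List.map_congr_left
  intro l _
  simp only [Function.comp_apply, List.reverse_reverse]
  exact pvRowB_zip c n l base h

-- ===== VERDICT (by name: the statement is the Claim_ definition above) =====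
theorem pvStepA_eq (N i : Int) (acc : List (List String) × List (List Int)) :
    (let combs := PySem.List.combinations (PySem.List.pyRange 0 N) i.toNat
     let e0 : List (List String) :=
       (List.range (combs.length * 3 ^ i.toNat)).foldl
         (fun e _ => e ++ [List.replicate N.toNat "I"]) []
     let st :=
       (List.range combs.length).foldl
         (fun (st : List (List Int) × List (List String)) j =>
           ((List.range (3 ^ i.toNat)).foldl (fun a _ => a ++ [combs.getD j []]) st.1,
            (List.range i.toNat).foldl
              (fun e k =>
                (List.range (3 ^ i.toNat)).foldl
                  (fun e l =>
                    let d := l / 3 ^ k % 3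
                    let pos := (combs.getD j []).getD k 0
                    let e := if d = 0 then pvSetCell e (j * 3 ^ i.toNat + l) pos "X" else e
                    let e := if d = 1 then pvSetCell e (j * 3 ^ i.toNat + l) pos "Y" else e
                    if d = 2 then pvSetCell e (j * 3 ^ i.toNat + l) pos "Z" else e)
                  e)
              st.2))
         (acc.2, e0)
     ((List.range st.2.length).foldl (fun el k => el ++ [st.2.getD k []]) acc.1, st.1))
    = (acc.1 ++ (PySem.List.combinations (PySem.List.pyRange 0 N) i.toNat).flatMap
          (fun c => pvRows c i.toNat (List.replicate N.toNat "I")),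
       acc.2 ++ (PySem.List.combinations (PySem.List.pyRange 0 N) i.toNat).flatMap
          (fun c => List.replicate (3 ^ i.toNat) c)) := by
  obtain ⟨a1, a2⟩ := acc
  dsimp only
  have hc : ∀ c ∈ PySem.List.combinations (PySem.List.pyRange 0 N) i.toNat, c.length = i.toNat :=
    fun c h => PySem.List.length_of_mem_combinations h
  rw [PySem.List.foldl_prod_mk
    (fun a j => (List.range (3 ^ i.toNat)).foldl
      (fun a _ => a ++ [(PySem.List.combinations (PySem.List.pyRange 0 N) i.toNat).getD j []]) a)
    (fun e j => (List.range i.toNat).foldl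
      (fun e k =>
        (List.range (3 ^ i.toNat)).foldl
          (fun e l =>
            if l / 3 ^ k % 3 = 2 then
              pvSetCell
                (if l / 3 ^ k % 3 = 1 then
                  pvSetCell
                    (if l / 3 ^ k % 3 = 0 then
                      pvSetCell e (j * 3 ^ i.toNat + l)
                        (((PySem.List.combinations (PySem.List.pyRange 0 N) i.toNat).getD j []).getD k 0) "X"
                    else e)
                    (j * 3 ^ i.toNat + l)
                    (((PySem.List.combinations (PySem.List.pyRange 0 N) i.toNat).getD j []).getD k 0) "Y"
                else
                  if l / 3 ^ k % 3 = 0 then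
                    pvSetCell e (j * 3 ^ i.toNat + l)
                      (((PySem.List.combinations (PySem.List.pyRange 0 N) i.toNat).getD j []).getD k 0) "X"
                  else e)
                (j * 3 ^ i.toNat + l)
                (((PySem.List.combinations (PySem.List.pyRange 0 N) i.toNat).getD j []).getD k 0) "Z"
            else
              if l / 3 ^ k % 3 = 1 then
                pvSetCell
                  (if l / 3 ^ k % 3 = 0 then
                    pvSetCell e (j * 3 ^ i.toNat + l)
                      (((PySem.List.combinations (PySem.List.pyRange 0 N) i.toNat).getD j []).getD k 0) "X"
                  else e)
                  (j * 3 ^ i.toNat + l)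
                  (((PySem.List.combinations (PySem.List.pyRange 0 N) i.toNat).getD j []).getD k 0) "Y"
              else
                if l / 3 ^ k % 3 = 0 then
                  pvSetCell e (j * 3 ^ i.toNat + l)
                    (((PySem.List.combinations (PySem.List.pyRange 0 N) i.toNat).getD j []).getD k 0) "X"
                else e)
          e)
      e)
    (List.range (PySem.List.combinations (PySem.List.pyRange 0 N) i.toNat).length)
    a2
    ((List.range ((PySem.List.combinations (PySem.List.pyRange 0 N) i.toNat).length * 3 ^ i.toNat)).foldl
      (fun e _ => e ++ [List.replicate N.toNat "I"]) [])]
  dsimp only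
  rw [PySem.List.foldl_append_singleton_eq_map (fun _ : Nat => List.replicate N.toNat "I")]
  rw [List.nil_append, List.map_const', List.length_range]
  have hg : (fun e j => (List.range i.toNat).foldl
      (fun e k =>
        (List.range (3 ^ i.toNat)).foldl
          (fun e l =>
            if l / 3 ^ k % 3 = 2 then
              pvSetCell
                (if l / 3 ^ k % 3 = 1 then
                  pvSetCell
                    (if l / 3 ^ k % 3 = 0 then
                      pvSetCell e (j * 3 ^ i.toNat + l)
                        (((PySem.List.combinations (PySem.List.pyRange 0 N) i.toNat).getD j []).getD k 0) "X"
                    else e)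
                    (j * 3 ^ i.toNat + l)
                    (((PySem.List.combinations (PySem.List.pyRange 0 N) i.toNat).getD j []).getD k 0) "Y"
                else
                  if l / 3 ^ k % 3 = 0 then
                    pvSetCell e (j * 3 ^ i.toNat + l)
                      (((PySem.List.combinations (PySem.List.pyRange 0 N) i.toNat).getD j []).getD k 0) "X"
                  else e)
                (j * 3 ^ i.toNat + l)
                (((PySem.List.combinations (PySem.List.pyRange 0 N) i.toNat).getD j []).getD k 0) "Z"
            else
              if l / 3 ^ k % 3 = 1 then
                pvSetCell
                  (if l / 3 ^ k % 3 = 0 then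
                    pvSetCell e (j * 3 ^ i.toNat + l)
                      (((PySem.List.combinations (PySem.List.pyRange 0 N) i.toNat).getD j []).getD k 0) "X"
                  else e)
                  (j * 3 ^ i.toNat + l)
                  (((PySem.List.combinations (PySem.List.pyRange 0 N) i.toNat).getD j []).getD k 0) "Y"
              else
                if l / 3 ^ k % 3 = 0 then
                  pvSetCell e (j * 3 ^ i.toNat + l)
                    (((PySem.List.combinations (PySem.List.pyRange 0 N) i.toNat).getD j []).getD k 0) "X"
                else e)
          e)
      e)
      = (fun (e : List (List String)) j => (List.range i.toNat).foldl
          (fun e k =>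
            (List.range (3 ^ i.toNat)).foldl
              (fun e l =>
                pvSetCell e ((0 + j) * 3 ^ i.toNat + l)
                  (((PySem.List.combinations (PySem.List.pyRange 0 N) i.toNat).getD (0 + j) []).getD k 0)
                  (pvLetter (l / 3 ^ k % 3)))
              e)
          e) := by
    funext e j
    congr 1
    funext e k
    congr 1
    funext e l
    rw [Nat.zero_add]
    exact pvBody_eq e (j * 3 ^ i.toNat + l) _ (l / 3 ^ k)
  rw [hg]
  have hb := pvBlock_eq i.toNat (3 ^ i.toNat) rfl (List.replicate N.toNat "I")
    (PySem.List.combinations (PySem.List.pyRange 0 N) i.toNat) hc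
    (PySem.List.combinations (PySem.List.pyRange 0 N) i.toNat).length 0 [] (by omega) (by simp)
  simp only [List.nil_append] at hb
  rw [hb]
  rw [← List.flatMap_def]
  simp only [Nat.zero_add]
  rw [pvFlatMap_getD (PySem.List.combinations (PySem.List.pyRange 0 N) i.toNat) []
    (fun c => pvRows c i.toNat (List.replicate N.toNat "I"))]
  rw [pvAppend_getD]
  have hf : (fun (a : List (List Int)) j => (List.range (3 ^ i.toNat)).foldl
        (fun a _ => a ++ [(PySem.List.combinations (PySem.List.pyRange 0 N) i.toNat).getD j []]) a)
      = (fun a j => a ++ List.replicate (3 ^ i.toNat) ((PySem.List.combinations (PySem.List.pyRange 0 N) i.toNat).getD j [])) := by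
    funext a j
    rw [PySem.List.foldl_append_singleton_eq_map
      (fun _ : Nat => (PySem.List.combinations (PySem.List.pyRange 0 N) i.toNat).getD j [])]
    rw [List.map_const', List.length_range]
  rw [hf]
  rw [PySem.List.foldl_append_eq_flatMap
    (fun j => List.replicate (3 ^ i.toNat) ((PySem.List.combinations (PySem.List.pyRange 0 N) i.toNat).getD j []))]
  rw [pvFlatMap_getD (PySem.List.combinations (PySem.List.pyRange 0 N) i.toNat) []
    (fun c => List.replicate (3 ^ i.toNat) c)]

theorem pvStepB_eq (N i : Int) (acc : List (List String) × List (List Int)) :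
    (PySem.List.combinations (PySem.List.pyRange 0 N) i.toNat).foldl
        (fun acc c =>
          (pvProdXYZ i.toNat).foldl
            (fun acc p =>
              let row := (c.zip p.reverse).foldl
                (fun r (qa : Int × String) => r.set qa.1.toNat qa.2)
                (List.replicate N.toNat "I")
              (acc.1 ++ [row], acc.2 ++ [c]))
            acc)
        acc
    = (acc.1 ++ (PySem.List.combinations (PySem.List.pyRange 0 N) i.toNat).flatMap
          (fun c => pvRows c i.toNat (List.replicate N.toNat "I")),
       acc.2 ++ (PySem.List.combinations (PySem.List.pyRange 0 N) i.toNat).flatMap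
          (fun c => List.replicate (3 ^ i.toNat) c)) := by
  have hin : (fun (acc : List (List String) × List (List Int)) (c : List Int) =>
        (pvProdXYZ i.toNat).foldl
          (fun acc p =>
            let row := (c.zip p.reverse).foldl
              (fun r (qa : Int × String) => r.set qa.1.toNat qa.2)
              (List.replicate N.toNat "I")
            (acc.1 ++ [row], acc.2 ++ [c]))
          acc)
      = (fun acc c =>
        (acc.1 ++ (pvProdXYZ i.toNat).map
            (fun p => (c.zip p.reverse).foldl
              (fun r (qa : Int × String) => r.set qa.1.toNat qa.2)
              (List.replicate N.toNat "I")),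
         acc.2 ++ List.replicate (3 ^ i.toNat) c)) := by
    funext acc c
    obtain ⟨a1, a2⟩ := acc
    show List.foldl
        (fun (acc : List (List String) × List (List Int)) p =>
          (acc.1 ++ [(c.zip p.reverse).foldl
              (fun r (qa : Int × String) => r.set qa.1.toNat qa.2) (List.replicate N.toNat "I")],
           acc.2 ++ [c]))
        (a1, a2) (pvProdXYZ i.toNat) = _
    rw [PySem.List.foldl_prod_mk
      (fun a p => a ++ [(c.zip p.reverse).foldl
        (fun r (qa : Int × String) => r.set qa.1.toNat qa.2) (List.replicate N.toNat "I")])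
      (fun b _ => b ++ [c]) (pvProdXYZ i.toNat) a1 a2]
    rw [PySem.List.foldl_append_singleton_eq_map, PySem.List.foldl_append_singleton_eq_map
      (fun _ => c)]
    rw [List.map_const', pvProd_length]
  obtain ⟨a1, a2⟩ := acc
  rw [hin]
  rw [PySem.List.foldl_prod_mk
    (fun a c => a ++ (pvProdXYZ i.toNat).map
      (fun p => (c.zip p.reverse).foldl
        (fun r (qa : Int × String) => r.set qa.1.toNat qa.2) (List.replicate N.toNat "I")))
    (fun b c => b ++ List.replicate (3 ^ i.toNat) c)
    (PySem.List.combinations (PySem.List.pyRange 0 N) i.toNat) a1 a2]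
  rw [PySem.List.foldl_append_eq_flatMap, PySem.List.foldl_append_eq_flatMap]
  congr 2
  apply List.flatMap_congr
  intro c hc
  exact pvRowsB c i.toNat (List.replicate N.toNat "I")
    (PySem.List.length_of_mem_combinations hc)

theorem list_of_errors_spec : Claim_equal_list_of_errors := by
  intro N t _
  unfold Spec_list_of_errors list_of_errors list_of_errors_alt
  congr 1
  funext acc i
  rw [pvStepB_eq N i acc]
  exact pvStepA_eq N i acc
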